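-- pv_equiv track=rewrite | github.com/jenchessica/python | Necklace.py | ispretty
-- ===== SOURCE A (Python) =====
-- def ispretty(arr):
--     stack = []
--     for i in range (0, len(arr)):
--         if len(stack)>0 and arr[i]==stack[-1]:
--             stack.pop()
--         else:
--             stack.append(arr[i])
--
--     if len(stack)==0:
--         return True
--     else:
--         return False
-- ===== SOURCE B (Python) =====
-- def ispretty(arr):
--     # Repeatedly delete the first adjacent equal pair until none remains;
--     # the array is "pretty" iff the fully reduced list is empty.
--     lst = list(arr)
--     while True:
--         for i in range(len(lst) - 1):
--             if lst[i] == lst[i + 1]: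
--                 del lst[i:i + 2]
--                 break
--         else:
--             return not lst
-- ===== Notes on version B (the rewrite author's own statement) =====
-- stated objective: alternative
-- what changed: Replaced the single stack pass by a rewrite-to-normal-form loop: repeatedly scan for the first adjacent equal pair, delete it, and restart, returning True iff the list reduces to empty (confluence of the xx->epsilon rewrite makes the verdicts agree).
import Mathlib
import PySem

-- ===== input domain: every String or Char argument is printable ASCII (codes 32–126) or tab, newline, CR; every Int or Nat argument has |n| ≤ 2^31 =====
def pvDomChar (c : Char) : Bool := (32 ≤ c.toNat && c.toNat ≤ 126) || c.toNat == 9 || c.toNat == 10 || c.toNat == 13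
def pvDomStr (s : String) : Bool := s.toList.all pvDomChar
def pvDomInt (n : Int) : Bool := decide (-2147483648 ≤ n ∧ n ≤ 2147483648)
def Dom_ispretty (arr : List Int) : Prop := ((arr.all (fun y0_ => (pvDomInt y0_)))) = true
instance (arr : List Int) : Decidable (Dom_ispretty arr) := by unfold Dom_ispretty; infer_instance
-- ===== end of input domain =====

-- B replaces the stack pass by repeated deletion of the first adjacent equal pair
-- until none remains (same verdict by confluence of the xx→ε rewrite); alternative
-- decomposition, not faster.

-- ===== PORT A =====
-- the stack is stored top-first (Python's stack[-1] is the head here, pop = tail, append = cons)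
def ispStep (stack : List Int) (x : Int) : List Int :=
  match stack with
  | t :: rest => if x = t then rest else x :: t :: rest   -- len(stack)>0 and arr[i]==stack[-1] → pop, else append
  | [] => [x]                                             -- empty stack → append

def ispretty (arr : List Int) : Bool :=
  let stack := (PySem.List.pyRange 0 (PySem.List.len arr) 1).foldl
    (fun stack i => ispStep stack (PySem.List.pyGetD arr i 0)) []
  if stack.length = 0 then true else false

-- ===== PORT B =====
-- first index i with l[i] == l[i+1] (the inner 'for' scan of Source B)
def findPair : List Int → Option Nat
  | x :: y :: t => if x = y then some 0 else (findPair (y :: t)).map (· + 1)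
  | _ => none

theorem findPair_lt : ∀ {l : List Int} {i : Nat}, findPair l = some i → i + 1 < l.length := by
  intro l
  induction l with
  | nil => intro i h; simp [findPair] at h
  | cons x t ih =>
    intro i h
    cases t with
    | nil => simp [findPair] at h
    | cons y u =>
      by_cases hxy : x = y
      · simp [findPair, hxy] at h; simp only [List.length_cons]; omega
      · simp [findPair, hxy] at h
        obtain ⟨j, hj, rfl⟩ := h
        have := ih hj
        simpa using Nat.succ_lt_succ this

-- the 'while True' loop: delete lst[i:i+2] and restart, until no pair is found
def reduceLoop (l : List Int) : List Int :=
  match h : findPair l with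
  | some i => reduceLoop (l.take i ++ l.drop (i + 2))
  | none => l
termination_by l.length
decreasing_by
  have := findPair_lt h
  simp [List.length_take, List.length_drop]
  omega

def ispretty_alt (arr : List Int) : Bool := (reduceLoop arr).isEmpty

-- ===== PRECONDITION & SPEC =====
def Spec_ispretty (arr : List Int) (out : Bool) : Prop := out = ispretty_alt arr
instance (arr : List Int) (out : Bool) : Decidable (Spec_ispretty arr out) := by unfold Spec_ispretty; infer_instance

-- ===== CLAIM (what is proved, stated in full; the proofs are below) =====
def Claim_equal_ispretty : Prop := ∀ (arr : List Int), Dom_ispretty arr → Spec_ispretty arr (ispretty arr)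

-- ===== LEMMAS AND PROOFS =====

-- shorthand for A's stack run
def ispRun (l : List Int) : List Int := l.foldl ispStep []

-- the stack never holds two adjacent equal elements
theorem ispStep_chain {s : List Int} (hs : s.IsChain (· ≠ ·)) (x : Int) :
    (ispStep s x).IsChain (· ≠ ·) := by
  cases s with
  | nil => simp [ispStep]
  | cons t r =>
    by_cases hxt : x = t
    · simpa [ispStep, hxt] using hs.tail
    · simpa [ispStep, hxt] using hs

theorem foldl_chain : ∀ (l : List Int) (s : List Int), s.IsChain (· ≠ ·) →
    (l.foldl ispStep s).IsChain (· ≠ ·) := by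
  intro l
  induction l with
  | nil => intro s hs; simpa
  | cons x t ih => intro s hs; exact ih _ (ispStep_chain hs x)

-- deleting an adjacent equal pair does not change the stack, provided the stack is chain-distinct
theorem foldl_pair {s : List Int} (hs : s.IsChain (· ≠ ·)) (x : Int) (t : List Int) :
    (x :: x :: t).foldl ispStep s = t.foldl ispStep s := by
  suffices h : ispStep (ispStep s x) x = s by simp [List.foldl, h]
  cases s with
  | nil => simp [ispStep]
  | cons a r =>
    by_cases hxa : x = a
    · cases r with
      | nil => simp [ispStep, hxa]
      | cons b r' =>
        have hab : a ≠ b := (List.isChain_cons_cons.mp hs).1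
        simp [ispStep, hxa, hab]
    · simp [ispStep, hxa]

-- findPair = some i exposes the pair: l = take i ++ x :: x :: drop (i+2)
theorem findPair_split : ∀ {l : List Int} {i : Nat}, findPair l = some i →
    ∃ x, l = l.take i ++ x :: x :: l.drop (i + 2) := by
  intro l
  induction l with
  | nil => intro i h; simp [findPair] at h
  | cons a t ih =>
    intro i h
    cases t with
    | nil => simp [findPair] at h
    | cons b u =>
      by_cases hab : a = b
      · simp [findPair, hab] at h
        subst h
        exact ⟨b, by simp [hab]⟩
      · simp [findPair, hab] at h
        obtain ⟨j, hj, rfl⟩ := h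
        obtain ⟨x, hx⟩ := ih hj
        exact ⟨x, by simpa using congrArg (a :: ·) hx⟩

-- each reduction step of B preserves A's stack result
theorem ispRun_delete {l : List Int} {i : Nat} (h : findPair l = some i) :
    ispRun (l.take i ++ l.drop (i + 2)) = ispRun l := by
  obtain ⟨x, hx⟩ := findPair_split h
  unfold ispRun
  conv_rhs => rw [hx]
  rw [List.foldl_append, List.foldl_append,
    foldl_pair (foldl_chain (l.take i) [] (by simp)) x]

theorem ispRun_reduceLoop : ∀ (l : List Int), ispRun (reduceLoop l) = ispRun l := by
  intro l
  induction l using reduceLoop.induct with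
  | case1 l i h ih => rw [reduceLoop, h, ih, ispRun_delete h]
  | case2 l h => rw [reduceLoop, h]

-- the output of reduceLoop has no adjacent equal pair
theorem findPair_reduceLoop : ∀ (l : List Int), findPair (reduceLoop l) = none := by
  intro l
  induction l using reduceLoop.induct with
  | case1 l i h ih => rw [reduceLoop, h]; exact ih
  | case2 l h => rw [reduceLoop, h]; exact h

theorem findPair_none_chain : ∀ {l : List Int}, findPair l = none → l.IsChain (· ≠ ·) := by
  intro l
  induction l with
  | nil => intro _; simp
  | cons a t ih =>
    intro h
    cases t with
    | nil => simp
    | cons b u =>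
      by_cases hab : a = b
      · simp [findPair, hab] at h
      · simp [findPair, hab] at h
        exact List.isChain_cons_cons.mpr ⟨hab, ih h⟩

-- on a chain-distinct word, the stack pass just reverses it
theorem foldl_of_chain : ∀ (l s : List Int), l.IsChain (· ≠ ·) →
    (∀ a b, l.head? = some a → s.head? = some b → a ≠ b) →
    l.foldl ispStep s = l.reverse ++ s := by
  intro l
  induction l with
  | nil => intro s _ _; simp
  | cons a t ih =>
    intro s hc hhd
    have hstep : ispStep s a = a :: s := by
      cases s with
      | nil => simp [ispStep]
      | cons b r => simp [ispStep, hhd a b rfl rfl]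
    have ht : t.foldl ispStep (a :: s) = t.reverse ++ a :: s := by
      refine ih (a :: s) hc.tail ?_
      intro c d hc' hd'
      simp at hd'
      subst hd'
      cases t with
      | nil => simp at hc'
      | cons e u =>
        simp at hc'
        subst hc'
        exact fun h => (List.isChain_cons_cons.mp hc).1 h.symm
    rw [List.foldl_cons, hstep, ht, List.reverse_cons, List.append_assoc, List.singleton_append]

-- A's answer equals "stack run is empty"
theorem ispretty_eq_run (arr : List Int) : ispretty arr = decide (ispRun arr = []) := by
  unfold ispretty ispRun
  rw [PySem.List.len_eq, PySem.List.foldl_pyRange_zero_pyGetD' arr 0 ispStep []]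
  by_cases h : arr.foldl ispStep [] = [] <;> simp [h]

-- ===== VERDICT (by name: the statement is the Claim_ definition above) =====
theorem ispretty_spec : Claim_equal_ispretty := by
  intro arr _
  unfold Spec_ispretty ispretty_alt
  rw [ispretty_eq_run, ← ispRun_reduceLoop arr]
  have hnone := findPair_reduceLoop arr
  have hchain := findPair_none_chain hnone
  have : ispRun (reduceLoop arr) = (reduceLoop arr).reverse := by
    unfold ispRun
    simpa using foldl_of_chain (reduceLoop arr) [] hchain (by intro a b _ hb; simp at hb)
  rw [this]
  cases reduceLoop arr <;> simp
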